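-- pv_equiv track=rewrite | github.com/johnson14988/practical-french-toolkit | search_sentence.py | is_ordered_sublist
-- ===== SOURCE A (Python) =====
-- def is_ordered_sublist(list1, list2, max_gap):
--     i = 0  # track list1's order
--
--     for item in list2:
--         found = False  # a mark indicate if word is found
--         while i < len(list1):
--             if list1[i] == item:
--                 found = True
--                 i += 1
--                 break
--             i += 1
--         if not found:
--             return False
--
--     # check if the gap of two items <= max_gap
--     for j in range(1, len(list2)):
--         if list1.index(list2[j]) - list1.index(list2[j - 1]) > max_gap:
--             return False
--
--     return True
-- ===== SOURCE B (Python) =====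
-- def is_ordered_sublist(list1, list2, max_gap):
--     # Index list1 once: word -> sorted list of all its positions. Then a single pass
--     # over list2 advances a cursor by binary search (smallest position > cursor) and
--     # checks the first-occurrence gap on the fly.
--     pos = {}
--     for i, w in enumerate(list1):
--         pos.setdefault(w, []).append(i)
--     cur = -1
--     prev_first = None
--     for w in list2:
--         lst = pos.get(w)
--         if lst is None or lst[-1] <= cur:
--             return False
--         lo, hi = 0, len(lst)
--         while lo < hi:
--             mid = (lo + hi) // 2
--             if lst[mid] <= cur:
--                 lo = mid + 1
--             else:
--                 hi = mid
--         cur = lst[lo]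
--         first = lst[0]
--         if prev_first is not None and first - prev_first > max_gap:
--             return False
--         prev_first = first
--     return True
-- ===== Notes on version B (the rewrite author's own statement) =====
-- stated objective: alternative
-- what changed: Replaced A's shared-cursor linear rescans (a while-loop over list1 per word, then a gap pass calling list1.index twice per adjacent pair) with a word->all-positions index built once and a single pass over list2 that advances the cursor by binary search over each word's position list and checks the first-occurrence gap on the fly.
import Mathlib
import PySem

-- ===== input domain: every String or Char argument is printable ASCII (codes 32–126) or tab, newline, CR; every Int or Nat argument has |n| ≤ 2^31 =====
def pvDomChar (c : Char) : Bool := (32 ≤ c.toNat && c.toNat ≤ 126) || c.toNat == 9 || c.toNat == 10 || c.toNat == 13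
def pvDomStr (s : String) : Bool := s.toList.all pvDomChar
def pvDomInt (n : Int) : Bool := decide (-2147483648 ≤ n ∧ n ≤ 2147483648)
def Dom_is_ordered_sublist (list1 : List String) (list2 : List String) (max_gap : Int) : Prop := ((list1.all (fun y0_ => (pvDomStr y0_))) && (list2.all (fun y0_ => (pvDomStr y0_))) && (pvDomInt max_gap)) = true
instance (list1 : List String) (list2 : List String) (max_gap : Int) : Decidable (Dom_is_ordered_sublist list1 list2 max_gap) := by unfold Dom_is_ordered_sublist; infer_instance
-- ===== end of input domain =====

-- B replaces A's two staged scans (shared-cursor while loop, then a gap loop calling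
-- list1.index twice per pair) by one pass over list2 driven by a word→positions index
-- built once, advancing the cursor by binary search and checking gaps on the fly.

-- ===== PORT A =====
-- inner 'while i < len(list1): …' loop: returns (found, i) as left by the loop/break
def aInner (list1 : List String) (item : String) (i : Nat) : Bool × Nat :=
  if h : i < list1.length then
    if list1[i] = item then (true, i + 1)
    else aInner list1 item (i + 1)
  else (false, i)
termination_by list1.length - i
decreasing_by exact Nat.sub_succ_lt_self _ _ h

-- 'for item in list2' with early return False
def aOuter (list1 : List String) (i : Nat) : List String → Bool
  | [] => true
  | item :: rest =>
    let r := aInner list1 item i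
    if r.1 then aOuter list1 r.2 rest else false

-- 'for j in range(1, len(list2))'; list1.index never fails when this loop is reached,
-- so .getD 0 is an unreachable default
def aGapLoop (list1 list2 : List String) (max_gap : Int) (j : Nat) : Bool :=
  if h : j < list2.length then
    if (((PySem.List.index? list1 (list2[j])).getD 0 : Nat) : Int) -
       (((PySem.List.index? list1 (list2[j - 1]'(by omega))).getD 0 : Nat) : Int) > max_gap then
      false
    else aGapLoop list1 list2 max_gap (j + 1)
  else true
termination_by list2.length - j
decreasing_by exact Nat.sub_succ_lt_self _ _ h

def is_ordered_sublist (list1 : List String) (list2 : List String) (max_gap : Int) : Bool :=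
  if aOuter list1 0 list2 then aGapLoop list1 list2 max_gap 1 else false

-- ===== PORT B =====
-- 'pos.setdefault(w, []).append(i)' loop: word -> list of its positions, in order
def buildPos : List String → Nat → PySem.Dict String (List Int) → PySem.Dict String (List Int)
  | [], _, d => d
  | w :: ws, i, d => buildPos ws (i + 1) (d.insert w (d.getD w [] ++ [(i : Int)]))

-- the hand-written 'while lo < hi' binary search of Source B, step for step;
-- the fuel argument only bounds the iteration count (any fuel ≥ hi - lo gives the loop's value)
def bsearch (lst : List Int) (cur : Int) : Nat → Nat → Nat → Nat
  | 0, lo, _ => lo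
  | fuel + 1, lo, hi =>
    if lo < hi then
      let mid := (lo + hi) / 2
      -- lst[mid]: mid is always in range when the loop runs (lo < hi ≤ len), so getD is exact
      if lst.getD mid 0 ≤ cur then bsearch lst cur fuel (mid + 1) hi
      else bsearch lst cur fuel lo mid
    else lo

-- 'for w in list2' with state (cur, prev_first); lists stored in pos are never empty,
-- so the getLast? none branch (Python's lst[-1] on []) is unreachable
def bLoop (pos : PySem.Dict String (List Int)) (max_gap : Int) :
    List String → Int → Option Int → Bool
  | [], _, _ => true
  | w :: ws, cur, prevFirst =>
    match pos.get? w with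
    | none => false
    | some lst =>
      match lst.getLast? with
      | none => false
      | some last =>
        if last ≤ cur then false
        else
          let lo := bsearch lst cur lst.length 0 lst.length
          let cur' := lst.getD lo 0
          let first := lst.getD 0 0
          match prevFirst with
          | some pf =>
            if first - pf > max_gap then false else bLoop pos max_gap ws cur' (some first)
          | none => bLoop pos max_gap ws cur' (some first)

def is_ordered_sublist_alt (list1 : List String) (list2 : List String) (max_gap : Int) : Bool :=
  bLoop (buildPos list1 0 PySem.Dict.empty) max_gap list2 (-1) none

-- ===== PRECONDITION & SPEC =====
def Spec_is_ordered_sublist (list1 : List String) (list2 : List String) (max_gap : Int) (out : Bool) : Prop := out = is_ordered_sublist_alt list1 list2 max_gap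
instance (list1 : List String) (list2 : List String) (max_gap : Int) (out : Bool) : Decidable (Spec_is_ordered_sublist list1 list2 max_gap out) := by unfold Spec_is_ordered_sublist; infer_instance

-- ===== CLAIM (what is proved, stated in full; the proofs are below) =====
def Claim_equal_is_ordered_sublist : Prop := ∀ (list1 : List String) (list2 : List String) (max_gap : Int), Dom_is_ordered_sublist list1 list2 max_gap → Spec_is_ordered_sublist list1 list2 max_gap (is_ordered_sublist list1 list2 max_gap)

-- ===== LEMMAS AND PROOFS =====

-- positions of w in l, offset by i0 (reference object both sides are reduced to)
def posOf : List String → String → Nat → List Int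
  | [], _, _ => []
  | x :: xs, w, i => if x = w then (i : Int) :: posOf xs w (i + 1) else posOf xs w (i + 1)

-- reference subsequence scan (cursor as an Int, -1 before the start)
def subCheck (l1 : List String) : List String → Int → Bool
  | [], _ => true
  | w :: ws, cur =>
    match (posOf l1 w 0).find? (fun p => decide (cur < p)) with
    | none => false
    | some p => subCheck l1 ws p

def firstIdx (l1 : List String) (w : String) : Int := ((posOf l1 w 0).head?).getD 0

-- reference gap scan, carrying the previous word's first occurrence
def gapCheck (l1 : List String) (mg : Int) : List String → Option Int → Bool
  | [], _ => true
  | w :: ws, some p => if firstIdx l1 w - p > mg then false else gapCheck l1 mg ws (some (firstIdx l1 w))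
  | w :: ws, none => gapCheck l1 mg ws (some (firstIdx l1 w))

lemma posOf_mem_bounds (w : String) :
    ∀ (l : List String) (i0 : Nat) (p : Int), p ∈ posOf l w i0 →
      (i0 : Int) ≤ p ∧ p < (i0 : Int) + l.length := by
  intro l
  induction l with
  | nil => intro i0 p hp; simp [posOf] at hp
  | cons x xs ih =>
    intro i0 p hp
    rw [posOf] at hp
    by_cases hx : x = w
    · rw [if_pos hx, List.mem_cons] at hp
      rcases hp with h | h
      · subst h; constructor <;> simp
      · have := ih (i0 + 1) p h; push_cast at this ⊢; constructor <;> [omega; (simp; omega)]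
    · rw [if_neg hx] at hp
      have := ih (i0 + 1) p hp; push_cast at this ⊢; constructor <;> [omega; (simp; omega)]

lemma posOf_sorted (w : String) :
    ∀ (l : List String) (i0 : Nat), (posOf l w i0).Pairwise (· < ·) := by
  intro l
  induction l with
  | nil => intro i0; simp [posOf]
  | cons x xs ih =>
    intro i0
    rw [posOf]
    by_cases hx : x = w
    · rw [if_pos hx]
      refine List.pairwise_cons.mpr ⟨?_, ih (i0 + 1)⟩
      intro p hp
      have := posOf_mem_bounds w xs (i0 + 1) p hp
      push_cast at this; omega
    · rw [if_neg hx]; exact ih (i0 + 1)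

lemma posOf_append (w : String) :
    ∀ (a b : List String) (i0 : Nat),
      posOf (a ++ b) w i0 = posOf a w i0 ++ posOf b w (i0 + a.length) := by
  intro a
  induction a with
  | nil => intro b i0; simp [posOf]
  | cons x xs ih =>
    intro b i0
    rw [List.cons_append, posOf, posOf]
    by_cases hx : x = w
    · rw [if_pos hx, if_pos hx, ih]
      simp; ring_nf
    · rw [if_neg hx, if_neg hx, ih]
      simp; ring_nf

lemma posOf_head_index (w : String) :
    ∀ (l : List String) (i0 : Nat),
      (posOf l w i0).head? = (PySem.List.index? l w).map (fun k => ((i0 + k : Nat) : Int)) := by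
  intro l
  induction l with
  | nil => intro i0; simp [posOf, PySem.List.index?_eq_idxOf?]
  | cons x xs ih =>
    intro i0
    rw [posOf]
    by_cases hx : x = w
    · subst hx
      rw [if_pos rfl, PySem.List.index?_cons_self]
      simp
    · rw [if_neg hx, PySem.List.index?_cons_of_ne xs hx, ih (i0 + 1)]
      cases PySem.List.index? xs w with
      | none => simp
      | some k => simp; ring

lemma firstIdx_eq_index (l : List String) (w : String) :
    firstIdx l w = (((PySem.List.index? l w).getD 0 : Nat) : Int) := by
  rw [firstIdx, posOf_head_index w l 0]
  cases PySem.List.index? l w <;> simp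

-- A's inner while loop in terms of posOf on the remaining suffix
lemma aInner_spec (l : List String) (w : String) :
    ∀ (n i : Nat), l.length - i ≤ n →
      aInner l w i = (match (posOf (l.drop i) w i).head? with
        | some p => (true, p.toNat + 1)
        | none => (false, max l.length i)) := by
  intro n
  induction n with
  | zero =>
    intro i hn
    have h : ¬ i < l.length := by omega
    have hd : l.drop i = [] := List.drop_eq_nil_of_le (by omega)
    rw [aInner, dif_neg h, hd]
    simp [posOf]; omega
  | succ m ih =>
    intro i hn
    rw [aInner]
    by_cases h : i < l.length
    · have hd : l.drop i = l[i] :: l.drop (i + 1) := List.drop_eq_getElem_cons h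
      rw [dif_pos h, hd, posOf]
      by_cases he : l[i] = w
      · rw [if_pos he, if_pos he]
        simp
      · rw [if_neg he, if_neg he, ih (i + 1) (by omega)]
        have : max l.length (i + 1) = max l.length i := by omega
        rw [this]
    · have hd : l.drop i = [] := List.drop_eq_nil_of_le (by omega)
      rw [dif_neg h, hd]
      simp [posOf]; omega

-- find? over the full position list = head? of the suffix position list
lemma find?_posOf_drop (l : List String) (w : String) (i : Nat) (hi : i ≤ l.length) :
    (posOf l w 0).find? (fun p => decide ((i : Int) - 1 < p)) = (posOf (l.drop i) w i).head? := by
  have hsplit : posOf l w 0 = posOf (l.take i) w 0 ++ posOf (l.drop i) w i := by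
    have := posOf_append w (l.take i) (l.drop i) 0
    rw [List.take_append_drop] at this
    rw [this, List.length_take, Nat.min_eq_left hi]
    simp
  rw [hsplit, List.find?_append]
  have h1 : (posOf (l.take i) w 0).find? (fun p => decide ((i : Int) - 1 < p)) = none := by
    rw [List.find?_eq_none]
    intro p hp
    have := posOf_mem_bounds w (l.take i) 0 p hp
    have hlen : (l.take i).length ≤ i := by simp
    simp only [decide_eq_true_eq] at *
    push_cast at this
    simp; omega
  rw [h1, Option.none_or]
  cases hc : posOf (l.drop i) w i with
  | nil => simp
  | cons p ps =>
    have hmem : p ∈ posOf (l.drop i) w i := by rw [hc]; exact List.mem_cons_self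
    have := posOf_mem_bounds w (l.drop i) i p hmem
    rw [List.find?_cons_of_pos]
    · simp
    · simp only [decide_eq_true_eq]; omega

-- A's outer loop is the reference subsequence scan
lemma aOuter_eq_subCheck (l1 : List String) :
    ∀ (l2 : List String) (i : Nat), i ≤ l1.length →
      aOuter l1 i l2 = subCheck l1 l2 ((i : Int) - 1) := by
  intro l2
  induction l2 with
  | nil => intro i _; rfl
  | cons w ws ih =>
    intro i hi
    rw [aOuter, subCheck, aInner_spec l1 w (l1.length - i) i le_rfl,
      ← find?_posOf_drop l1 w i hi]
    cases hf : (posOf l1 w 0).find? (fun p => decide ((i : Int) - 1 < p)) with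
    | none => simp
    | some p =>
      have hmem : p ∈ posOf l1 w 0 := List.mem_of_find?_eq_some hf
      have hb := posOf_mem_bounds w l1 0 p hmem
      simp only []
      have hp' : ((p.toNat + 1 : Nat) : Int) - 1 = p := by omega
      rw [ih (p.toNat + 1) (by omega), hp']
      simp

-- the dictionary built by buildPos looks up to posOf
lemma buildPos_get? (w : String) :
    ∀ (l : List String) (i0 : Nat) (d : PySem.Dict String (List Int)),
      (buildPos l i0 d).get? w =
        if posOf l w i0 = [] then d.get? w else some (d.getD w [] ++ posOf l w i0) := by
  intro l
  induction l with
  | nil => intro i0 d; simp [buildPos, posOf]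
  | cons x xs ih =>
    intro i0 d
    rw [buildPos, ih, posOf]
    by_cases hx : x = w
    · subst hx
      rw [if_pos rfl]
      simp only [List.cons_ne_nil]
      split
      · rw [PySem.Dict.get?_insert_self]
        simp_all
      · rw [PySem.Dict.getD_insert_self]
        simp
    · rw [if_neg hx]
      have hg : (d.insert x (d.getD x [] ++ [(i0 : Int)])).get? w = d.get? w :=
        PySem.Dict.get?_insert_of_ne _ _ (Ne.symm hx)
      have hgd : (d.insert x (d.getD x [] ++ [(i0 : Int)])).getD w [] = d.getD w [] := by
        rw [PySem.Dict.getD_insert]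
        simp [Ne.symm hx]
      rw [hg, hgd]

-- monotone access on a sorted list
lemma sorted_le (lst : List Int) (hs : lst.Pairwise (· < ·)) {j k : Nat}
    (hjk : j ≤ k) (hk : k < lst.length) : lst[j]'(by omega) ≤ lst[k] := by
  rcases eq_or_lt_of_le hjk with h | h
  · subst h; rfl
  · exact le_of_lt ((List.pairwise_iff_getElem.mp hs) j k (by omega) hk h)

-- the binary search sandwich
lemma bsearch_spec (lst : List Int) (cur : Int) (hs : lst.Pairwise (· < ·)) :
    ∀ (n lo hi : Nat), hi - lo ≤ n → lo ≤ hi → hi ≤ lst.length →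
      (∀ k (hk : k < lst.length), k < lo → lst[k] ≤ cur) →
      (∀ k (hk : k < lst.length), hi ≤ k → cur < lst[k]) →
      lo ≤ bsearch lst cur n lo hi ∧ bsearch lst cur n lo hi ≤ hi ∧
      (∀ k (hk : k < lst.length), k < bsearch lst cur n lo hi → lst[k] ≤ cur) ∧
      (∀ k (hk : k < lst.length), bsearch lst cur n lo hi ≤ k → cur < lst[k]) := by
  intro n
  induction n with
  | zero =>
    intro lo hi hn hlh hhl hlow hhigh
    rw [bsearch]
    exact ⟨le_rfl, hlh, hlow, fun k hk hle => hhigh k hk (by omega)⟩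
  | succ m ih =>
    intro lo hi hn hlh hhl hlow hhigh
    rw [bsearch]
    by_cases h : lo < hi
    · rw [if_pos h]
      simp only []
      set mid := (lo + hi) / 2 with hmid
      have hmr : mid < lst.length := by omega
      have hget : lst.getD mid 0 = lst[mid] := List.getD_eq_getElem lst 0 hmr
      rw [hget]
      by_cases hc : lst[mid] ≤ cur
      · rw [if_pos hc]
        exact (fun r => ⟨by omega, r.2.1, r.2.2⟩) (ih (mid + 1) hi (by omega) (by omega) hhl
          (fun k hk hkm => le_trans (sorted_le lst hs (by omega) hmr) hc) hhigh)
      · rw [if_neg hc]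
        rw [not_le] at hc
        exact (fun r => ⟨r.1, by omega, r.2.2.1, r.2.2.2⟩) (ih lo mid (by omega) (by omega)
          (by omega) hlow (fun k hk hmk => lt_of_lt_of_le hc (sorted_le lst hs hmk hk)))
    · rw [if_neg h]
      exact ⟨le_rfl, hlh, hlow, fun k hk hle => hhigh k hk (by omega)⟩

-- find? on a list that flips from false to true at index r
lemma find?_of_flip (p : Int → Bool) :
    ∀ (lst : List Int) (r : Nat) (hr : r < lst.length),
      (∀ k (hk : k < lst.length), k < r → p lst[k] = false) → p (lst[r]'hr) = true →
      lst.find? p = some (lst[r]'hr) := by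
  intro lst
  induction lst with
  | nil => intro r hr; simp at hr
  | cons x xs ih =>
    intro r hr hlow hhit
    cases r with
    | zero =>
      have hx : p x = true := by simpa using hhit
      rw [List.find?_cons_of_pos hx]
      simp
    | succ s =>
      have hx : p x = false := hlow 0 (by simp) (by omega)
      rw [List.find?_cons_of_neg (by simp [hx])]
      exact ih s (by simpa using hr) (fun k hk hks => hlow (k + 1) (by simpa using hk) (by omega)) hhit

-- B's loop is the subsequence scan AND-ed with the gap scan
lemma bLoop_eq (l1 : List String) (mg : Int) :
    ∀ (l2 : List String) (cur : Int) (pf : Option Int),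
      bLoop (buildPos l1 0 PySem.Dict.empty) mg l2 cur pf =
        (subCheck l1 l2 cur && gapCheck l1 mg l2 pf) := by
  intro l2
  induction l2 with
  | nil => intro cur pf; rfl
  | cons w ws ih =>
    intro cur pf
    rw [bLoop, subCheck, buildPos_get? w l1 0 PySem.Dict.empty]
    by_cases hp : posOf l1 w 0 = []
    · rw [if_pos hp, hp]
      simp
    · rw [if_neg hp]
      have hemp : PySem.Dict.empty.getD w ([] : List Int) = [] := rfl
      rw [hemp, List.nil_append]
      simp only []
      set lst := posOf l1 w 0 with hlst
      have hlen : 0 < lst.length := List.length_pos_iff.mpr hp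
      have hs : lst.Pairwise (· < ·) := posOf_sorted w l1 0
      have hlast : lst.getLast? = some (lst[lst.length - 1]'(by omega)) := by
        rw [List.getLast?_eq_getElem?, List.getElem?_eq_getElem (by omega)]
      rw [hlast]
      simp only []
      by_cases hle : lst[lst.length - 1]'(by omega) ≤ cur
      · rw [if_pos hle]
        have hfind : lst.find? (fun p => decide (cur < p)) = none := by
          rw [List.find?_eq_none]
          intro p hpm
          obtain ⟨k, hk, hpk⟩ := List.mem_iff_getElem.mp hpm
          have := sorted_le lst hs (show k ≤ lst.length - 1 by omega) (by omega)
          simp only [decide_eq_true_eq]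
          omega
        rw [hfind]
        simp
      · rw [if_neg hle]
        rw [not_le] at hle
        obtain ⟨hr1, hr2, hr3, hr4⟩ := bsearch_spec lst cur hs lst.length 0 lst.length
          (by omega) (by omega) le_rfl (by omega) (by omega)
        set r := bsearch lst cur lst.length 0 lst.length with hrdef
        have hrlt : r < lst.length := by
          by_contra hge
          have := hr3 (lst.length - 1) (by omega) (by omega)
          omega
        have hfind : lst.find? (fun p => decide (cur < p)) = some (lst[r]'hrlt) := by
          apply find?_of_flip _ lst r hrlt
          · intro k hk hkr
            simp only [decide_eq_false_iff_not, not_lt]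
            exact hr3 k hk hkr
          · simp only [decide_eq_true_eq]
            exact hr4 r hrlt le_rfl
        rw [hfind]
        have hcur' : lst.getD r 0 = lst[r]'hrlt := List.getD_eq_getElem lst 0 hrlt
        have hfirst : lst.getD 0 0 = firstIdx l1 w := by
          rw [List.getD_eq_getElem lst 0 hlen, firstIdx, ← hlst,
            List.head?_eq_getElem?, List.getElem?_eq_getElem hlen]
          rfl
        rw [hcur', hfirst]
        cases pf with
        | none => rw [gapCheck]; exact ih _ _
        | some p =>
          rw [gapCheck]
          simp only []
          by_cases hg : firstIdx l1 w - p > mg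
          · rw [if_pos hg, if_pos hg]
            simp
          · rw [if_neg hg, if_neg hg, ih _ _]

-- A's gap loop is the reference gap scan on the suffix
lemma aGapLoop_eq_gapCheck (l1 l2 : List String) (mg : Int) :
    ∀ (n j : Nat) (_hn : l2.length - j ≤ n) (h1 : 1 ≤ j) (h2 : j ≤ l2.length),
      aGapLoop l1 l2 mg j = gapCheck l1 mg (l2.drop j) (some (firstIdx l1 (l2[j - 1]'(by omega)))) := by
  intro n
  induction n with
  | zero =>
    intro j _hn h1 h2
    have h : ¬ j < l2.length := by omega
    have hd : l2.drop j = [] := List.drop_eq_nil_of_le (by omega)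
    rw [aGapLoop, dif_neg h, hd, gapCheck]
  | succ m ih =>
    intro j hn h1 h2
    rw [aGapLoop]
    by_cases h : j < l2.length
    · have hd : l2.drop j = l2[j] :: l2.drop (j + 1) := List.drop_eq_getElem_cons h
      rw [dif_pos h, hd, gapCheck, ← firstIdx_eq_index, ← firstIdx_eq_index]
      by_cases hg : firstIdx l1 (l2[j]) - firstIdx l1 (l2[j - 1]'(by omega)) > mg
      · rw [if_pos hg, if_pos hg]
      · rw [if_neg hg, if_neg hg, ih (j + 1) (by omega) (by omega) (by omega)]
        simp
    · have hd : l2.drop j = [] := List.drop_eq_nil_of_le (by omega)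
      rw [dif_neg h, hd, gapCheck]

-- ===== VERDICT (by name: the statement is the Claim_ definition above) =====
theorem is_ordered_sublist_spec : Claim_equal_is_ordered_sublist := by
  intro list1 list2 max_gap _
  unfold Spec_is_ordered_sublist is_ordered_sublist is_ordered_sublist_alt
  rw [bLoop_eq list1 max_gap list2 (-1) none,
    show ((-1 : Int)) = ((0 : Nat) : Int) - 1 by norm_num,
    ← aOuter_eq_subCheck list1 list2 0 (by omega)]
  cases ha : aOuter list1 0 list2 with
  | false => simp
  | true =>
    rw [if_pos rfl, Bool.true_and]
    cases list2 with
    | nil =>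
      rw [aGapLoop, dif_neg (by simp)]
      rfl
    | cons w ws =>
      rw [gapCheck,
        aGapLoop_eq_gapCheck list1 (w :: ws) max_gap ws.length 1 (by simp) le_rfl (by simp)]
      simp
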